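-- pv_equiv track=rewrite | github.com/bayisagit/python-codes | letcode with python/threesumtarget.py | calc
-- ===== SOURCE A (Python) =====
-- def calc(nums:list,ta:int)->int:
--     nums.sort()
--     l=len(nums)
--     ans=0
--     for i in range(l):
--         j=i+1
--         k=l-1
--         while j<k:
--             sum=nums[i]+nums[j]+nums[k]
--             if sum<ta:
--                 ans+=k-j
--                 j+=1
--             else:
--                 k-=1
--     return ans
-- ===== SOURCE B (Python) =====
-- def calc(nums: list, ta: int) -> int:
--     # Same return value as A; keeps the in-place sort side effect.
--     nums.sort()
--     l = len(nums)
--     ans = 0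
--     for i in range(l):
--         for j in range(i + 1, l):
--             for k in range(j + 1, l):
--                 if nums[i] + nums[j] + nums[k] < ta:
--                     ans += 1
--     return ans
-- ===== Notes on version B (the rewrite author's own statement) =====
-- stated objective: simpler
-- what changed: Replaced the sorted two-pointer pair-counting inner loop with a plain exhaustive enumeration of all triples i<j<k, counting those whose sum is below the target (the sort is kept for its in-place side effect).
import Mathlib
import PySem

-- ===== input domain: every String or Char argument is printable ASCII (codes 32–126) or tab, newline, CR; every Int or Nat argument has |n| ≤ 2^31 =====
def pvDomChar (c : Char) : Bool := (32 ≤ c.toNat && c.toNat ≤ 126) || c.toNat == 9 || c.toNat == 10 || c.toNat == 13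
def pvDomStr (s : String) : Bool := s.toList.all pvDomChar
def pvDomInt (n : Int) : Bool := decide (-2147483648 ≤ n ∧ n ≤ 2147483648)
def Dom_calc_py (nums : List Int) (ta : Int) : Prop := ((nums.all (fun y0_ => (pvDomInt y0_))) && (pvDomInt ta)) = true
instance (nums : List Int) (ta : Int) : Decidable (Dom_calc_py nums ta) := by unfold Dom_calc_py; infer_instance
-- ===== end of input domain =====

-- B replaces A's sorted two-pointer pair counting with a plain triple loop over all
-- i<j<k (simpler, not faster). Both Pythons sort `nums` in place; the equivalence
-- proved here is about the return value.

-- ===== PORT A =====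
-- the while loop: j, k move toward each other; terminates on k - j
def calcInnerA (s : List Int) (ta i : Int) (j k ans : Int) : Int :=
  if h : j < k then
    if PySem.List.pyGetD s i 0 + PySem.List.pyGetD s j 0 + PySem.List.pyGetD s k 0 < ta then
      calcInnerA s ta i (j + 1) k (ans + (k - j))
    else
      calcInnerA s ta i j (k - 1) ans
  else ans
termination_by (k - j).toNat
decreasing_by all_goals omega

def calc_py (nums : List Int) (ta : Int) : Int :=
  let s := PySem.List.sorted nums id
  let l : Int := s.length
  (PySem.List.pyRange 0 l).foldl (fun ans i => calcInnerA s ta i (i + 1) (l - 1) ans) 0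

-- ===== PORT B =====
def calc_py_alt (nums : List Int) (ta : Int) : Int :=
  let s := PySem.List.sorted nums id
  let l : Int := s.length
  (PySem.List.pyRange 0 l).foldl (fun ans i =>
    (PySem.List.pyRange (i + 1) l).foldl (fun ans j =>
      (PySem.List.pyRange (j + 1) l).foldl (fun ans k =>
        if PySem.List.pyGetD s i 0 + PySem.List.pyGetD s j 0 + PySem.List.pyGetD s k 0 < ta then
          ans + 1
        else ans) ans) ans) 0

-- ===== PRECONDITION & SPEC =====
def Spec_calc_py (nums : List Int) (ta : Int) (out : Int) : Prop := out = calc_py_alt nums ta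
instance (nums : List Int) (ta : Int) (out : Int) : Decidable (Spec_calc_py nums ta out) := by unfold Spec_calc_py; infer_instance

-- ===== CLAIM (what is proved, stated in full; the proofs are below) =====
def Claim_equal_calc_py : Prop := ∀ (nums : List Int) (ta : Int), Dom_calc_py nums ta → Spec_calc_py nums ta (calc_py nums ta)

-- ===== LEMMAS AND PROOFS =====

-- 0/1 indicator of "s[i] + s[j] + s[k] < ta"
def trip (s : List Int) (ta i j k : Int) : Int :=
  if PySem.List.pyGetD s i 0 + PySem.List.pyGetD s j 0 + PySem.List.pyGetD s k 0 < ta then 1 else 0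

-- number of pairs (j', k') with j ≤ j' < k' ≤ k whose triple with i is below ta
def N (s : List Int) (ta i j k : Int) : Int :=
  ((PySem.List.pyRange j k).map (fun j' =>
    ((PySem.List.pyRange (j' + 1) (k + 1)).map (fun k' => trip s ta i j' k')).sum)).sum

lemma getD_mono (s : List Int) (hs : s.Pairwise (· ≤ ·)) {a b : Int}
    (h0 : 0 ≤ a) (hab : a ≤ b) (hb : b < (s.length : Int)) :
    PySem.List.pyGetD s a 0 ≤ PySem.List.pyGetD s b 0 := by
  rw [PySem.List.pyGetD_eq_getElem s 0 h0 (by omega),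
      PySem.List.pyGetD_eq_getElem s 0 (by omega) hb]
  rcases eq_or_lt_of_le hab with h | h
  · subst h; exact le_refl _
  · exact List.pairwise_iff_getElem.mp hs a.toNat b.toNat (by omega) (by omega) (by omega)

lemma foldl_if_sum {α : Type} (p : α → Prop) [DecidablePred p] (l : List α) (a : Int) :
    l.foldl (fun acc x => if p x then acc + 1 else acc) a
      = a + (l.map (fun x => if p x then (1 : Int) else 0)).sum := by
  have h : (fun (acc : Int) x => if p x then acc + 1 else acc)
      = fun (acc : Int) x => acc + (if p x then (1 : Int) else 0) := by
    funext acc x; split <;> simp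
  rw [h, PySem.List.foldl_add]

lemma innerA_eq (s : List Int) (ta i : Int) (hs : s.Pairwise (· ≤ ·)) (hi : 0 ≤ i) :
    ∀ (n : Nat) (j k ans : Int), (k - j).toNat ≤ n → i < j → k < (s.length : Int) →
      calcInnerA s ta i j k ans = ans + N s ta i j k := by
  intro n
  induction n with
  | zero =>
    intro j k ans hn hij hk
    rw [calcInnerA]
    rw [dif_neg (by omega)]
    simp [N, PySem.List.pyRange_one_eq_nil (show k ≤ j by omega)]
  | succ n ih =>
    intro j k ans hn hij hk
    by_cases hjk : j < k
    · rw [calcInnerA, dif_pos hjk]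
      by_cases hc : PySem.List.pyGetD s i 0 + PySem.List.pyGetD s j 0 + PySem.List.pyGetD s k 0 < ta
      · rw [if_pos hc, ih (j + 1) k (ans + (k - j)) (by omega) (by omega) hk]
        have hNj : N s ta i j k = (k - j) + N s ta i (j + 1) k := by
          unfold N
          rw [PySem.List.pyRange_one_cons hjk, List.map_cons, List.sum_cons]
          have hall : ((PySem.List.pyRange (j + 1) (k + 1)).map (fun k' => trip s ta i j k')).sum
              = k - j := by
            have hmap : (PySem.List.pyRange (j + 1) (k + 1)).map (fun k' => trip s ta i j k')
                = (PySem.List.pyRange (j + 1) (k + 1)).map (fun _ => (1 : Int)) := by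
              apply List.map_congr_left
              intro k' hk'
              rw [PySem.List.mem_pyRange_one] at hk'
              have hle : PySem.List.pyGetD s k' 0 ≤ PySem.List.pyGetD s k 0 :=
                getD_mono s hs (by omega) (by omega) hk
              simp only [trip, if_pos (by omega : PySem.List.pyGetD s i 0 + PySem.List.pyGetD s j 0 + PySem.List.pyGetD s k' 0 < ta)]
            rw [hmap, PySem.List.sum_map_const_int, PySem.List.length_pyRange_one]
            omega
          rw [hall]
        omega
      · rw [if_neg hc, ih j (k - 1) ans (by omega) hij (by omega)]
        have hNk : N s ta i j k = N s ta i j (k - 1) := by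
          unfold N
          have step1 : (PySem.List.pyRange j k).map (fun j' =>
              ((PySem.List.pyRange (j' + 1) (k + 1)).map (fun k' => trip s ta i j' k')).sum)
            = (PySem.List.pyRange j k).map (fun j' =>
              ((PySem.List.pyRange (j' + 1) ((k - 1) + 1)).map (fun k' => trip s ta i j' k')).sum) := by
            apply List.map_congr_left
            intro j' hj'
            rw [PySem.List.mem_pyRange_one] at hj'
            have hsplit : PySem.List.pyRange (j' + 1) (k + 1)
                = PySem.List.pyRange (j' + 1) k ++ [k] := by
              have := PySem.List.pyRange_one_succ_right (a := j' + 1) (b := k) (by omega)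
              simpa using this
            rw [hsplit, List.map_append, List.sum_append]
            have hzero : trip s ta i j' k = 0 := by
              have hle : PySem.List.pyGetD s j 0 ≤ PySem.List.pyGetD s j' 0 :=
                getD_mono s hs (by omega) (by omega) (by omega)
              simp only [trip, if_neg (by omega : ¬ (PySem.List.pyGetD s i 0 + PySem.List.pyGetD s j' 0 + PySem.List.pyGetD s k 0 < ta))]
            have : (k - 1) + 1 = k := by omega
            rw [this]
            simp [hzero]
          rw [step1]
          have houter : PySem.List.pyRange j k = PySem.List.pyRange j (k - 1) ++ [k - 1] := by
            have := PySem.List.pyRange_one_succ_right (a := j) (b := k - 1) (by omega)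
            have hk' : (k - 1) + 1 = k := by omega
            rw [hk'] at this
            exact this
          rw [houter, List.map_append, List.sum_append]
          simp
        omega
    · rw [calcInnerA, dif_neg hjk]
      simp [N, PySem.List.pyRange_one_eq_nil (show k ≤ j by omega)]

-- B's per-i double loop, written as the same nested sum
lemma altInner_eq (s : List Int) (ta i : Int) (ans : Int) :
    (PySem.List.pyRange (i + 1) (s.length : Int)).foldl (fun ans j =>
      (PySem.List.pyRange (j + 1) (s.length : Int)).foldl (fun ans k =>
        if PySem.List.pyGetD s i 0 + PySem.List.pyGetD s j 0 + PySem.List.pyGetD s k 0 < ta then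
          ans + 1
        else ans) ans) ans
    = ans + ((PySem.List.pyRange (i + 1) (s.length : Int)).map (fun j =>
        ((PySem.List.pyRange (j + 1) (s.length : Int)).map (fun k => trip s ta i j k)).sum)).sum := by
  have h : (fun (ans : Int) j =>
      (PySem.List.pyRange (j + 1) (s.length : Int)).foldl (fun ans k =>
        if PySem.List.pyGetD s i 0 + PySem.List.pyGetD s j 0 + PySem.List.pyGetD s k 0 < ta then
          ans + 1
        else ans) ans)
      = fun (ans : Int) j => ans +
        ((PySem.List.pyRange (j + 1) (s.length : Int)).map (fun k => trip s ta i j k)).sum := by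
    funext ans j
    rw [foldl_if_sum]
    rfl
  rw [h, PySem.List.foldl_add]

-- the count over j ∈ (i, l), k ∈ (j, l) equals N s ta i (i+1) (l-1)
lemma N_eq_altSum (s : List Int) (ta i : Int) (_hi0 : 0 ≤ i) (hil : i < (s.length : Int)) :
    N s ta i (i + 1) ((s.length : Int) - 1)
      = ((PySem.List.pyRange (i + 1) (s.length : Int)).map (fun j =>
          ((PySem.List.pyRange (j + 1) (s.length : Int)).map (fun k => trip s ta i j k)).sum)).sum := by
  unfold N
  have hinner : ((s.length : Int) - 1) + 1 = (s.length : Int) := by omega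
  rw [hinner]
  by_cases h : i + 1 ≤ (s.length : Int) - 1
  · have houter : PySem.List.pyRange (i + 1) (s.length : Int)
        = PySem.List.pyRange (i + 1) ((s.length : Int) - 1) ++ [(s.length : Int) - 1] := by
      have := PySem.List.pyRange_one_succ_right (a := i + 1) (b := (s.length : Int) - 1) h
      rw [hinner] at this
      exact this
    rw [houter, List.map_append, List.sum_append]
    simp
  · rw [PySem.List.pyRange_one_eq_nil (show (s.length : Int) - 1 ≤ i + 1 by omega),
        PySem.List.pyRange_one_eq_nil (show (s.length : Int) ≤ i + 1 by omega)]

-- ===== VERDICT (by name: the statement is the Claim_ definition above) =====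
theorem calc_py_spec : Claim_equal_calc_py := by
  intro nums ta _
  unfold Spec_calc_py calc_py calc_py_alt
  have hs : (PySem.List.sorted nums id).Pairwise (· ≤ ·) := by
    have := PySem.List.sorted_pairwise nums id
    simpa using this
  apply PySem.List.foldl_congr_mem
  intro ans i hi
  rw [PySem.List.mem_pyRange_one] at hi
  rw [innerA_eq (PySem.List.sorted nums id) ta i hs (by omega)
        ((((PySem.List.sorted nums id).length : Int) - 1) - (i + 1)).toNat
        (i + 1) (((PySem.List.sorted nums id).length : Int) - 1) ans (le_refl _) (by omega) (by omega),
      altInner_eq, N_eq_altSum (PySem.List.sorted nums id) ta i (by omega) (by omega)]
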